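-- pv_equiv track=rewrite | github.com/ahmedehabb/BERTnParse | camel_parser/utils.py | extract_morph_features_from_block
-- ===== SOURCE A (Python) =====
-- def extract_features_from_ud(ud_string):
--     """Parse the 'ud=' string and return a dict of features."""
--     if not ud_string.startswith('ud='):
--         return {}
--     feature_string = ud_string
--     features = feature_string.split('|')
--     feature_dict = {}
--     for feat in features:
--         if '=' in feat:
--             k, v = feat.split('=', 1)
--             feature_dict[k] = v
--     return feature_dict
--
-- def extract_morph_features_from_block(block, all_features):
--     """
--     Extract morphological features from one CoNLL block.
--     Returns: dict of {feature_name: list of values}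
--     """
--     features_by_name = {feat: [] for feat in all_features}
--
--     for line in block:
--         if line.startswith('#'):
--             continue
--         parts = line.strip().split('\t')
--         if len(parts) < 8:
--             continue
--         morph_dict = extract_features_from_ud(parts[5])
--         for feat in all_features:
--             features_by_name[feat].append(morph_dict.get(feat, "na"))  # "na" for missing
--     return features_by_name
-- ===== SOURCE B (Python) =====
-- def extract_morph_features_from_block(block, all_features):
--     """
--     Extract morphological features from one CoNLL block.
--     Returns: dict of {feature_name: list of values}
--     """
--     fields = [line.strip().split('\t')[5] for line in block
--               if not line.startswith('#') and len(line.strip().split('\t')) >= 8]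
--
--     def value_of(feat, ud):
--         # last occurrence of feat in the ud string wins (dict semantics),
--         # found by scanning the segments back-to-front; no dict is built
--         if not ud.startswith('ud='):
--             return "na"
--         for seg in reversed(ud.split('|')):
--             if '=' in seg:
--                 k, v = seg.split('=', 1)
--                 if k == feat:
--                     return v
--         return "na"
--
--     return {feat: [value_of(feat, ud) for ud in fields] for feat in all_features}
-- ===== Notes on version B (the rewrite author's own statement) =====
-- stated objective: alternative
-- what changed: B builds no per-line feature dict at all: it keeps only each surviving line's raw 6th field and answers each feature by a back-to-front scan of that field's '|'-segments (last occurrence wins, which is exactly dict-overwrite semantics), assembling the result feature-major.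
import Mathlib
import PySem

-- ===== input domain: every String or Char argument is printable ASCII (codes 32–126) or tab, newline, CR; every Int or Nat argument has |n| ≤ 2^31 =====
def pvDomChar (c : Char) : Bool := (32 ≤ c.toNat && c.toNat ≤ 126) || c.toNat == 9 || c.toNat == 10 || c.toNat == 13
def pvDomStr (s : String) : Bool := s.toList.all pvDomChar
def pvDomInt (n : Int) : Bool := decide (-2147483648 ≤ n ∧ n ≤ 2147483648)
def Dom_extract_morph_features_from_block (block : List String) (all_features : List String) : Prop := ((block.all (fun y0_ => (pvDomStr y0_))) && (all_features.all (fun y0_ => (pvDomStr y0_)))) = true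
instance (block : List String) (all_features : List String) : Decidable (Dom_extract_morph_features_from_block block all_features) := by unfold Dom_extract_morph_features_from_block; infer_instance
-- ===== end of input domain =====

-- B builds no per-line feature dict: it keeps each surviving line's raw 6th field and answers
-- each feature by a back-to-front scan of its '|'-segments (last occurrence wins), feature-major.


-- ===== PORT A =====
-- same-module helper used by A
def extract_features_from_ud (ud_string : String) : PySem.Dict String String :=
  if ¬ (PySem.Str.startswith ud_string "ud=" = true) then PySem.Dict.empty
  else
    let features := (PySem.Str.split? ud_string "|").getD []   -- sep "|" ≠ "": split? is always some
    features.foldl (fun feature_dict feat =>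
      if PySem.Str.isIn "=" feat = true then
        match PySem.Str.splitMax? feat "=" 1 with
        | some [k, v] => feature_dict.insert k v
        | _ => feature_dict   -- unreachable: '=' ∈ feat gives exactly two pieces
      else feature_dict) PySem.Dict.empty

def extract_morph_features_from_block (block : List String) (all_features : List String) : List (String × List String) :=
  let features_by_name : PySem.Dict String (List String) :=
    all_features.foldl (fun d feat => d.insert feat []) PySem.Dict.empty
  (block.foldl (fun d line =>
    if PySem.Str.startswith line "#" = true then d
    else
      let parts := (PySem.Str.split? (PySem.Str.strip line) "\t").getD []   -- sep ≠ "": always some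
      if parts.length < 8 then d
      else
        let morph_dict := extract_features_from_ud (PySem.List.pyGetD parts 5 "")  -- in range: 8 ≤ length
        -- features_by_name[feat].append(…): feat is always a key, so this is exactly modify
        all_features.foldl (fun d feat => d.modify feat [] (fun l => l ++ [morph_dict.getD feat "na"])) d)
    features_by_name).items

-- ===== PORT B =====
-- the back-to-front scan of the segment list: first matching 'feat=' segment wins, else "na"
def pvSegScan (feat : String) : List String → String
  | [] => "na"
  | seg :: rest =>
    if PySem.Str.isIn "=" seg = true then
      match PySem.Str.splitMax? seg "=" 1 with
      | some [k, v] => if k = feat then v else pvSegScan feat rest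
      | _ => pvSegScan feat rest   -- unreachable: '=' ∈ seg gives exactly two pieces
    else pvSegScan feat rest

def pvValueOf (feat ud : String) : String :=
  if ¬ (PySem.Str.startswith ud "ud=" = true) then "na"
  else pvSegScan feat (((PySem.Str.split? ud "|").getD []).reverse)   -- reversed(ud.split('|'))

def extract_morph_features_from_block_alt (block : List String) (all_features : List String) : List (String × List String) :=
  let fields : List String :=
    (block.filter (fun line =>
        (!PySem.Str.startswith line "#") &&
          decide (8 ≤ ((PySem.Str.split? (PySem.Str.strip line) "\t").getD []).length))).map
      (fun line => PySem.List.pyGetD ((PySem.Str.split? (PySem.Str.strip line) "\t").getD []) 5 "")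
  (all_features.foldl (fun d feat => d.insert feat (fields.map (fun ud => pvValueOf feat ud)))
    PySem.Dict.empty).items

-- ===== PRECONDITION & SPEC =====
-- Pre_ excludes lists with duplicate feature names: A appends each line's value once per
-- occurrence into the single deduped dict key, while B's feature-major comprehension yields
-- one value per line — the duplicate-key corner is accidental dict behaviour either way.
def Pre_extract_morph_features_from_block (block : List String) (all_features : List String) : Prop :=
  all_features.Nodup
instance (block : List String) (all_features : List String) : Decidable (Pre_extract_morph_features_from_block block all_features) := by unfold Pre_extract_morph_features_from_block; infer_instance

def pvWitness_extract_morph_features_from_block : List String × List String :=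
  (["1\t2\t3\t4\t5\tud=x|A=b\t7\t8", "# c"], ["A", "B"])

def Spec_extract_morph_features_from_block (block : List String) (all_features : List String) (out : List (String × List String)) : Prop := out = extract_morph_features_from_block_alt block all_features
instance (block : List String) (all_features : List String) (out : List (String × List String)) : Decidable (Spec_extract_morph_features_from_block block all_features out) := by unfold Spec_extract_morph_features_from_block; infer_instance

-- ===== CLAIM (what is proved, stated in full; the proofs are below) =====
def Claim_equal_extract_morph_features_from_block : Prop := ∀ (block : List String) (all_features : List String), Dom_extract_morph_features_from_block block all_features → Pre_extract_morph_features_from_block block all_features → Spec_extract_morph_features_from_block block all_features (extract_morph_features_from_block block all_features)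

-- ===== LEMMAS AND PROOFS =====

-- the per-line data both loops compute
def pvParts (line : String) : List String := (PySem.Str.split? (PySem.Str.strip line) "\t").getD []
def pvKeep (line : String) : Bool := (!PySem.Str.startswith line "#") && decide (8 ≤ (pvParts line).length)
def pvMd (line : String) : PySem.Dict String String := extract_features_from_ud (PySem.List.pyGetD (pvParts line) 5 "")
def pvUdOf (line : String) : String := PySem.List.pyGetD (pvParts line) 5 ""

-- the value one segment contributes for a feature, and the first hit in a segment list
def pvSegVal? (feat seg : String) : Option String :=
  if PySem.Str.isIn "=" seg = true then
    match PySem.Str.splitMax? seg "=" 1 with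
    | some [k, v] => if k = feat then some v else none
    | _ => none
  else none

def pvFirstVal? (feat : String) : List String → Option String
  | [] => none
  | seg :: rest => (pvSegVal? feat seg).or (pvFirstVal? feat rest)

lemma segScan_eq_firstVal (feat : String) (l : List String) :
    pvSegScan feat l = (pvFirstVal? feat l).getD "na" := by
  induction l with
  | nil => rfl
  | cons seg rest ih =>
    simp only [pvSegScan, pvFirstVal?, pvSegVal?]
    by_cases h : PySem.Str.isIn "=" seg = true
    · rw [if_pos h, if_pos h]
      rcases hs : PySem.Str.splitMax? seg "=" 1 with _ | ⟨l0⟩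
      · simpa using ih
      · match l0 with
        | [] => simpa using ih
        | [k] => simpa using ih
        | [k, v] =>
          by_cases hk : k = feat
          · simp [hk]
          · simpa [hk] using ih
        | k :: v :: w :: t => simpa using ih
    · rw [if_neg h, if_neg h]
      simpa using ih

lemma firstVal?_append (feat : String) (xs ys : List String) :
    pvFirstVal? feat (xs ++ ys) = (pvFirstVal? feat xs).or (pvFirstVal? feat ys) := by
  induction xs with
  | nil => simp [pvFirstVal?]
  | cons a t ih => simp [pvFirstVal?, ih, Option.or_assoc]

-- the fold building A's per-line dict, read back through getD, is the reverse first-hit scan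
lemma fold_getD (feat : String) : ∀ (l : List String) (d : PySem.Dict String String),
    (l.foldl (fun feature_dict seg =>
      if PySem.Str.isIn "=" seg = true then
        match PySem.Str.splitMax? seg "=" 1 with
        | some [k, v] => feature_dict.insert k v
        | _ => feature_dict
      else feature_dict) d).getD feat "na"
    = (pvFirstVal? feat l.reverse).getD (d.getD feat "na") := by
  intro l
  induction l with
  | nil => intro d; simp [pvFirstVal?]
  | cons seg rest ih =>
    intro d
    simp only [List.foldl_cons, List.reverse_cons]
    rw [ih, firstVal?_append]
    have hstep :
        ((if PySem.Str.isIn "=" seg = true then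
            match PySem.Str.splitMax? seg "=" 1 with
            | some [k, v] => d.insert k v
            | _ => d
          else d).getD feat "na")
        = (pvSegVal? feat seg).getD (d.getD feat "na") := by
      simp only [pvSegVal?]
      by_cases h : PySem.Str.isIn "=" seg = true
      · rw [if_pos h, if_pos h]
        rcases hs : PySem.Str.splitMax? seg "=" 1 with _ | ⟨l0⟩
        · simp
        · match l0 with
          | [] => simp
          | [k] => simp
          | [k, v] =>
            by_cases hk : k = feat
            · simp [hk, PySem.Dict.getD_insert]
            · simp [hk, PySem.Dict.getD_insert, Ne.symm hk]
          | k :: v :: w :: t => simp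
      · rw [if_neg h, if_neg h]; simp
    rw [hstep]
    cases pvFirstVal? feat rest.reverse <;> simp [pvFirstVal?]

-- the bridge: A's dict lookup with default "na" is B's reverse scan
lemma getD_extract (feat ud : String) :
    (extract_features_from_ud ud).getD feat "na" = pvValueOf feat ud := by
  unfold extract_features_from_ud pvValueOf
  by_cases h : PySem.Str.startswith ud "ud=" = true
  · rw [if_neg (not_not_intro h), if_neg (not_not_intro h)]
    rw [fold_getD, segScan_eq_firstVal]
    cases pvFirstVal? feat (((PySem.Str.split? ud "|").getD []).reverse) <;>
      simp [PySem.Dict.getD, PySem.Dict.get?, PySem.Dict.empty]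
  · rw [if_pos h, if_pos h]
    simp [PySem.Dict.getD, PySem.Dict.get?, PySem.Dict.empty]

-- A's inner loop over distinct keys, each present exactly once in the items list, appends one value to each
lemma inner_loop (v : String → String) :
    ∀ (l : List String) (pre : List (String × List String)) (g : String → List String),
      l.Nodup → (∀ f ∈ l, ∀ p ∈ pre, p.1 ≠ f) →
      l.foldl (fun d feat => PySem.Dict.modify d feat [] (fun cur => cur ++ [v feat]))
        (PySem.Dict.mk (pre ++ l.map (fun f => (f, g f))))
      = PySem.Dict.mk (pre ++ l.map (fun f => (f, g f ++ [v f]))) := by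
  intro l
  induction l with
  | nil => intro pre g _ _; simp
  | cons a t ih =>
    intro pre g hn hdis
    simp only [List.foldl_cons, List.map_cons]
    have hpre : ∀ p ∈ pre, (p.1 == a) = false := by
      intro p hp
      exact beq_eq_false_iff_ne.mpr (hdis a (by simp) p hp)
    have ht : ∀ p ∈ t.map (fun f => (f, g f)), (p.1 == a) = false := by
      intro p hp
      obtain ⟨f, hf, rfl⟩ := List.mem_map.mp hp
      exact beq_eq_false_iff_ne.mpr fun h => (List.nodup_cons.mp hn).1 (h ▸ hf)
    have hstep :
        PySem.Dict.modify (PySem.Dict.mk (pre ++ (a, g a) :: t.map (fun f => (f, g f)))) a []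
            (fun cur => cur ++ [v a])
        = PySem.Dict.mk ((pre ++ [(a, g a ++ [v a])]) ++ t.map (fun f => (f, g f))) := by
      simp only [PySem.Dict.modify, PySem.Dict.insert, PySem.Dict.contains, PySem.Dict.getD,
        PySem.Dict.get?]
      rw [List.find?_append, List.find?_eq_none.mpr (by intro p hp; simp [hpre p hp])]
      simp only [List.find?_cons, beq_self_eq_true]
      have hany : ((pre ++ (a, g a) :: t.map fun f => (f, g f)).any fun p => p.1 == a) = true := by
        simp [List.any_append]
      rw [if_pos hany]
      rw [List.append_assoc, List.singleton_append]
      congr 1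
      simp only [Option.none_or, Option.map_some, Option.getD_some]
      rw [List.map_append, List.map_cons]
      congr 1
      · conv_rhs => rw [← List.map_id pre]
        exact List.map_congr_left (fun p hp => by simp [hpre p hp])
      · congr 1
        · simp
        · conv_rhs => rw [← List.map_id (t.map (fun f => (f, g f)))]
          exact List.map_congr_left (fun p hp => by simp [ht p hp])
    rw [hstep]
    rw [ih (pre ++ [(a, g a ++ [v a])]) g (List.nodup_cons.mp hn).2 ?_]
    · simp
    · intro f hf p hp
      rcases List.mem_append.mp hp with h | h
      · exact hdis f (by simp [hf]) p h
      · simp only [List.mem_singleton] at h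
        subst h
        intro heq
        apply (List.nodup_cons.mp hn).1
        rw [show (a, g a ++ [v a]).1 = a from rfl] at heq
        exact heq ▸ hf

-- A's outer loop, feature lists described pointwise
lemma outer_loop (all_features : List String) (hn : all_features.Nodup) :
    ∀ (block : List String) (g : String → List String),
      block.foldl (fun d line =>
        if PySem.Str.startswith line "#" = true then d
        else
          let parts := (PySem.Str.split? (PySem.Str.strip line) "\t").getD []
          if parts.length < 8 then d
          else
            let morph_dict := extract_features_from_ud (PySem.List.pyGetD parts 5 "")
            all_features.foldl (fun d feat => d.modify feat [] (fun l => l ++ [morph_dict.getD feat "na"])) d)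
        (PySem.Dict.mk (all_features.map (fun f => (f, g f))))
      = PySem.Dict.mk (all_features.map (fun f =>
          (f, g f ++ ((block.filter pvKeep).map pvMd).map (fun md => md.getD f "na")))) := by
  intro block
  induction block with
  | nil => intro g; simp
  | cons line rest ih =>
    intro g
    simp only [List.foldl_cons, List.filter_cons]
    by_cases hs : PySem.Str.startswith line "#" = true
    · have hk : pvKeep line = false := by simp only [pvKeep]; rw [hs]; simp
      rw [if_pos hs, hk, ih g]
      simp
    · rw [if_neg hs]
      have hs' : PySem.Str.startswith line "#" = false := Bool.eq_false_iff.mpr hs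
      by_cases hl : (pvParts line).length < 8
      · have hk : pvKeep line = false := by
          simp only [pvKeep]; rw [hs']
          simpa [pvParts] using hl
        simp only [pvParts] at hl
        rw [if_pos hl, hk, ih g]
        simp
      · have hk : pvKeep line = true := by
          simp only [pvKeep]; rw [hs']
          simpa [pvParts] using hl
        simp only [pvParts] at hl
        rw [if_neg hl, hk]
        have hinner := inner_loop (fun feat => (pvMd line).getD feat "na") all_features [] g hn (by simp)
        simp only [List.nil_append] at hinner
        rw [show extract_features_from_ud (PySem.List.pyGetD ((PySem.Str.split? (PySem.Str.strip line) "\t").getD []) 5 "") = pvMd line from rfl]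
        rw [hinner, ih (fun f => g f ++ [(pvMd line).getD f "na"])]
        simp

-- A's init dict and B's result dict are fresh-key insert loops
lemma init_items (l : List String) (hn : l.Nodup) (w : String → List String) :
    (l.foldl (fun d feat => d.insert feat (w feat)) PySem.Dict.empty).items
    = l.map (fun f => (f, w f)) := by
  have h := PySem.Dict.items_foldl_insert_fresh l id w PySem.Dict.empty
    (fun a _ => PySem.Dict.contains_empty a) (by simpa using hn)
  simpa using h

lemma init_dict (l : List String) (hn : l.Nodup) (w : String → List String) :
    l.foldl (fun d feat => d.insert feat (w feat)) PySem.Dict.empty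
    = PySem.Dict.mk (l.map (fun f => (f, w f))) := by
  calc l.foldl (fun d feat => d.insert feat (w feat)) PySem.Dict.empty
      = PySem.Dict.mk ((l.foldl (fun d feat => d.insert feat (w feat)) PySem.Dict.empty).items) := rfl
    _ = PySem.Dict.mk (l.map (fun f => (f, w f))) := by rw [init_items l hn w]

-- ===== VERDICT (by name: the statement is the Claim_ definition above) =====
theorem extract_morph_features_from_block_spec : Claim_equal_extract_morph_features_from_block := by
  intro block all_features _ hpre
  unfold Spec_extract_morph_features_from_block
  unfold extract_morph_features_from_block extract_morph_features_from_block_alt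
  simp only
  rw [init_dict all_features hpre (fun _ => [])]
  rw [outer_loop all_features hpre block (fun _ => [])]
  rw [init_items all_features hpre
    (fun feat => ((block.filter (fun line =>
        (!PySem.Str.startswith line "#") &&
          decide (8 ≤ ((PySem.Str.split? (PySem.Str.strip line) "\t").getD []).length))).map
      (fun line => PySem.List.pyGetD ((PySem.Str.split? (PySem.Str.strip line) "\t").getD []) 5 "")).map
      (fun ud => pvValueOf feat ud))]
  have hfilter : (block.filter (fun line =>
      (!PySem.Str.startswith line "#") &&
        decide (8 ≤ ((PySem.Str.split? (PySem.Str.strip line) "\t").getD []).length)))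
      = block.filter pvKeep := rfl
  rw [hfilter]
  simp only [List.map_map]
  apply List.map_congr_left
  intro f _
  refine congrArg _ (congrArg _ ?_)
  apply List.map_congr_left
  intro line _
  simp only [Function.comp]
  rw [show (PySem.List.pyGetD ((PySem.Str.split? (PySem.Str.strip line) "\t").getD []) 5 "") = pvUdOf line from rfl]
  rw [show pvMd line = extract_features_from_ud (pvUdOf line) from rfl]
  exact getD_extract f (pvUdOf line)
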